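-- pv_equiv track=rewrite | github.com/CodingProgrammer/HackerRank_Python | (Greedy)Beautiful_Pairs.py | beautifulPairs
-- ===== SOURCE A (Python) =====
-- def beautifulPairs(A, B, n):
--     result = 0
--     bucket_A = set()
--     bucket_B = set()
--     for i in range(n):
--         for j in range(n):
--             if A[i] == B[j]:
--                 if i not in bucket_A and j not in bucket_B:
--                     bucket_A.add(i)
--                     bucket_B.add(j)
--                     result += 1
--                     break
--     if result == n:
--         return result - 1
--     else:
--         return result + 1
-- ===== SOURCE B (Python) =====
-- def beautifulPairs(A, B, n):
--     sa = sorted(A[:n])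
--     sb = sorted(B[:n])
--     result = 0
--     i = j = 0
--     while i < len(sa) and j < len(sb):
--         if sa[i] == sb[j]:
--             result += 1
--             i += 1
--             j += 1
--         elif sa[i] < sb[j]:
--             i += 1
--         else:
--             j += 1
--     if result == n:
--         return result - 1
--     else:
--         return result + 1
-- ===== Notes on version B (the rewrite author's own statement) =====
-- stated objective: faster
-- what changed: Replaces A's O(n^2) nested index scan with used-index bucket sets by sorting the two n-prefixes and counting value matches with a single two-pointer merge; the same result==n ? result-1 : result+1 tail.
-- outside the precondition, e.g. on beautifulPairs([1, 2], [1, 2], -1): A returns 1, B returns 2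
import Mathlib
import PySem

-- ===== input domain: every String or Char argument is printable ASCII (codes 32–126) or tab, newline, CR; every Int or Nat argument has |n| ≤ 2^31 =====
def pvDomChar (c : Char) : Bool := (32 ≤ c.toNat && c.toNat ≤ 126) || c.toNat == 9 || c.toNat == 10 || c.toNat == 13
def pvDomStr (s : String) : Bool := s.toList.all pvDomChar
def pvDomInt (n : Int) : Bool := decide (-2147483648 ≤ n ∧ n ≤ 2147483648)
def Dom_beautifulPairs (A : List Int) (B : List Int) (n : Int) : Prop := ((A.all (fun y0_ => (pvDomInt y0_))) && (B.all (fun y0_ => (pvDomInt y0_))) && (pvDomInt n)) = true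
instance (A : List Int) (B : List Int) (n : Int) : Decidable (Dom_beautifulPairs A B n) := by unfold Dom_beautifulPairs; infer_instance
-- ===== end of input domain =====

-- B replaces A's quadratic nested index scan with sort-the-prefixes plus a two-pointer merge;
-- both compute the sum over values of min(count in A[:n], count in B[:n]) and the same ±1 tail.

-- ===== PORT A =====
-- inner 'for j in range(n)' with break; indexing by pyGetD (exact under Pre_: all indices in range)
def bpInnerA (A : List Int) (B : List Int) (i : Int) (js : List Int)
    (result : Int) (bA bB : PySem.Set Int) : Int × PySem.Set Int × PySem.Set Int :=
  match js with
  | [] => (result, bA, bB)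
  | j :: js' =>
    if PySem.List.pyGetD A i 0 == PySem.List.pyGetD B j 0 then
      if !(PySem.Set.contains bA i) && !(PySem.Set.contains bB j) then
        (result + 1, PySem.Set.add bA i, PySem.Set.add bB j)   -- break
      else bpInnerA A B i js' result bA bB
    else bpInnerA A B i js' result bA bB

-- outer 'for i in range(n)'
def bpOuterA (A : List Int) (B : List Int) (n : Int) (is : List Int)
    (st : Int × PySem.Set Int × PySem.Set Int) : Int × PySem.Set Int × PySem.Set Int :=
  match is with
  | [] => st
  | i :: is' => bpOuterA A B n is' (bpInnerA A B i (PySem.List.pyRange 0 n) st.1 st.2.1 st.2.2)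

def beautifulPairs (A : List Int) (B : List Int) (n : Int) : Int :=
  let st := bpOuterA A B n (PySem.List.pyRange 0 n) (0, PySem.Set.empty, PySem.Set.empty)
  if st.1 == n then st.1 - 1 else st.1 + 1

-- ===== PORT B =====
-- the two-pointer 'while i < len(sa) and j < len(sb)' loop of Source B, as fuel-bounded recursion on the
-- two remaining suffixes (each iteration shortens one side, so fuel = len sa + len sb suffices)
def bpMergeF (fuel : Nat) (sa sb : List Int) (result : Int) : Int :=
  match fuel, sa, sb with
  | f + 1, x :: xs, y :: ys =>
    if x == y then bpMergeF f xs ys (result + 1)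
    else if x < y then bpMergeF f xs (y :: ys) result
    else bpMergeF f (x :: xs) ys result
  | _, _, _ => result

def bpMerge (sa sb : List Int) (result : Int) : Int :=
  bpMergeF (sa.length + sb.length) sa sb result

def beautifulPairs_alt (A : List Int) (B : List Int) (n : Int) : Int :=
  let sa := PySem.List.sorted (PySem.List.slice A none (some n)) (fun x => x)
  let sb := PySem.List.sorted (PySem.List.slice B none (some n)) (fun x => x)
  let result := bpMerge sa sb 0
  if result == n then result - 1 else result + 1

-- ===== PRECONDITION & SPEC =====
-- Pre_ excludes (a) n > len(A) or n > len(B), where A raises IndexError, and (b) negative n,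
-- outside the natural domain (n is a count of elements): there A returns 1 while B's negative-slice prefixes differ.
def Pre_beautifulPairs (A : List Int) (B : List Int) (n : Int) : Prop :=
  0 ≤ n ∧ n ≤ (A.length : Int) ∧ n ≤ (B.length : Int)
instance (A : List Int) (B : List Int) (n : Int) : Decidable (Pre_beautifulPairs A B n) := by
  unfold Pre_beautifulPairs; infer_instance

def pvWitness_beautifulPairs : List Int × List Int × Int := ([1, 2, 4], [2, 1, 3], 3)

def Spec_beautifulPairs (A : List Int) (B : List Int) (n : Int) (out : Int) : Prop := out = beautifulPairs_alt A B n
instance (A : List Int) (B : List Int) (n : Int) (out : Int) : Decidable (Spec_beautifulPairs A B n out) := by unfold Spec_beautifulPairs; infer_instance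

-- ===== CLAIM (what is proved, stated in full; the proofs are below) =====
def Claim_equal_beautifulPairs : Prop := ∀ (A : List Int) (B : List Int) (n : Int), Dom_beautifulPairs A B n → Pre_beautifulPairs A B n → Spec_beautifulPairs A B n (beautifulPairs A B n)

-- ===== LEMMAS AND PROOFS =====

-- values of B at the indices of js not yet consumed (bucketed) by bB, in index order
def bpRes (B : List Int) (js : List Int) (bB : PySem.Set Int) : List Int :=
  (js.filter (fun j => !(PySem.Set.contains bB j))).map (fun j => PySem.List.pyGetD B j 0)

theorem contains_eq_decide (s : PySem.Set Int) (x : Int) :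
    PySem.Set.contains s x = decide (x ∈ s) := by
  rw [Bool.eq_iff_iff]; simp

theorem bpRes_cons (B : List Int) (j : Int) (js : List Int) (bB : PySem.Set Int) :
    bpRes B (j :: js) bB =
      if j ∈ bB then bpRes B js bB
      else PySem.List.pyGetD B j 0 :: bpRes B js bB := by
  by_cases h : j ∈ bB <;> simp [bpRes, h]

-- A-side inner loop: either no free index of js carries the value A[i] and the state is unchanged,
-- or the loop breaks at the first such index j₀, which erases one occurrence of A[i] from the residual
theorem bpInnerA_spec (A B : List Int) (i : Int) (js : List Int) (r : Int)
    (bA bB : PySem.Set Int) (hnd : js.Nodup) (hi : PySem.Set.contains bA i = false) :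
    (PySem.List.pyGetD A i 0 ∉ bpRes B js bB →
      bpInnerA A B i js r bA bB = (r, bA, bB)) ∧
    (PySem.List.pyGetD A i 0 ∈ bpRes B js bB →
      ∃ j₀, j₀ ∈ js ∧
        bpInnerA A B i js r bA bB = (r + 1, PySem.Set.add bA i, PySem.Set.add bB j₀) ∧
        bpRes B js (PySem.Set.add bB j₀) = (bpRes B js bB).erase (PySem.List.pyGetD A i 0)) := by
  set a := PySem.List.pyGetD A i 0 with ha_def
  induction js generalizing bB with
  | nil => refine ⟨fun _ => rfl, fun h => ?_⟩; simp [bpRes] at h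
  | cons j js' ih =>
    rcases List.nodup_cons.mp hnd with ⟨hjnot, hnd'⟩
    have ih' := fun bB => ih bB hnd'
    by_cases hb : j ∈ bB
    · -- j already consumed: both code paths recurse; residual unchanged
      have hstep : bpInnerA A B i (j :: js') r bA bB = bpInnerA A B i js' r bA bB := by
        simp only [bpInnerA, contains_eq_decide, hb, decide_true, Bool.not_true, Bool.and_false]
        split <;> simp
      rw [bpRes_cons, if_pos hb, hstep]
      refine ⟨(ih' bB).1, fun hmem => ?_⟩
      rcases (ih' bB).2 hmem with ⟨j₀, hj₀, heq, hres⟩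
      refine ⟨j₀, List.mem_cons_of_mem _ hj₀, heq, ?_⟩
      rw [bpRes_cons, if_pos (by rw [PySem.Set.mem_add]; exact Or.inl hb), hres]
    · by_cases hav : a = PySem.List.pyGetD B j 0
      · -- free match at the head index: the loop breaks here
        have hstep : bpInnerA A B i (j :: js') r bA bB
            = (r + 1, PySem.Set.add bA i, PySem.Set.add bB j) := by
          simp only [bpInnerA, ← ha_def, hav, BEq.rfl, if_true, hi,
            contains_eq_decide, hb]
          simp
        rw [bpRes_cons, if_neg hb]
        constructor
        · intro hno; exact absurd (by rw [hav]; exact List.mem_cons_self) hno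
        · intro _
          refine ⟨j, List.mem_cons_self, hstep, ?_⟩
          rw [bpRes_cons, if_pos (by rw [PySem.Set.mem_add]; exact Or.inr rfl), hav,
            List.erase_cons_head]
          -- residual over js' unchanged by consuming j ∉ js'
          unfold bpRes
          congr 1
          apply List.filter_congr
          intro x hx
          have hxj : x ≠ j := fun h => hjnot (h ▸ hx)
          simp [PySem.Set.mem_add, hxj]
      · -- head value differs from a: the loop moves on
        have hstep : bpInnerA A B i (j :: js') r bA bB = bpInnerA A B i js' r bA bB := by
          simp only [bpInnerA, ← ha_def]
          rw [if_neg (by simpa using hav)]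
        rw [bpRes_cons, if_neg hb, hstep]
        have hane : a ≠ PySem.List.pyGetD B j 0 := hav
        constructor
        · intro hno
          exact (ih' bB).1 (fun h => hno (List.mem_cons_of_mem _ h))
        · intro hmem
          have hmem' : a ∈ bpRes B js' bB := by
            rcases List.mem_cons.mp hmem with h | h
            · exact absurd h hane
            · exact h
          rcases (ih' bB).2 hmem' with ⟨j₀, hj₀, heq, hres⟩
          refine ⟨j₀, List.mem_cons_of_mem _ hj₀, heq, ?_⟩
          have hjne : j ≠ j₀ := fun h => hjnot (h ▸ hj₀)
          rw [bpRes_cons, if_neg (by rw [PySem.Set.mem_add]; rintro (h | h); exact hb h; exact hjne h),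
            hres, List.erase_cons_tail (by simpa using (Ne.symm hane))]

-- erasing a value absent from the left list leaves a bagInter unchanged (cons on the right)
theorem bagInter_cons_right_of_notMem (l ys : List Int) (y : Int) (h : y ∉ l) :
    l.bagInter (y :: ys) = l.bagInter ys := by
  induction l generalizing ys with
  | nil => simp
  | cons a l ih =>
    have hay : a ≠ y := fun hy => h (hy ▸ List.mem_cons_self)
    have hl : y ∉ l := fun hy => h (List.mem_cons_of_mem _ hy)
    by_cases hmem : a ∈ ys
    · rw [List.cons_bagInter_of_pos _ (List.mem_cons_of_mem _ hmem),
        List.cons_bagInter_of_pos _ hmem,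
        List.erase_cons_tail (by simp; exact fun h => hay h.symm)]
      exact congrArg _ (ih _ hl)
    · rw [List.cons_bagInter_of_neg _ (by simp [hay, hmem]),
        List.cons_bagInter_of_neg _ hmem]
      exact ih _ hl

-- B-side: the two-pointer merge on sorted lists counts the multiset intersection
theorem bpMergeF_eq_bagInter (fuel : Nat) (sa sb : List Int) (r : Int)
    (hf : sa.length + sb.length ≤ fuel)
    (ha : sa.Pairwise (· ≤ ·)) (hb : sb.Pairwise (· ≤ ·)) :
    bpMergeF fuel sa sb r = r + ((sa.bagInter sb).length : Int) := by
  induction fuel generalizing sa sb r with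
  | zero =>
    have : sa = [] ∧ sb = [] := by
      constructor <;> (cases sa <;> cases sb <;> simp_all)
    simp [bpMergeF, this.1]
  | succ f ih =>
    match sa, sb with
    | [], sb => simp [bpMergeF]
    | x :: xs, [] => simp [bpMergeF]
    | x :: xs, y :: ys =>
      simp only [bpMergeF]
      rcases List.pairwise_cons.mp ha with ⟨hxle, ha'⟩
      rcases List.pairwise_cons.mp hb with ⟨hyle, hb'⟩
      simp only [List.length_cons] at hf
      by_cases hxy : x = y
      · subst hxy
        rw [if_pos (by simp)]
        rw [ih xs ys (r + 1) (by omega) ha' hb',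
          List.cons_bagInter_of_pos _ List.mem_cons_self, List.erase_cons_head]
        simp; omega
      · rw [if_neg (by simp [hxy])]
        by_cases hlt : x < y
        · rw [if_pos hlt]
          have hxnot : x ∉ y :: ys := by
            intro hx
            rcases List.mem_cons.mp hx with h | h
            · exact hxy h
            · exact absurd (hyle _ h) (by omega)
          rw [ih xs (y :: ys) r (by simp; omega) ha' hb,
            List.cons_bagInter_of_neg _ hxnot]
        · rw [if_neg hlt]
          have hynot : y ∉ x :: xs := by
            intro hy
            rcases List.mem_cons.mp hy with h | h
            · exact hxy h.symm
            · exact absurd (hxle _ h) (by omega)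
          rw [ih (x :: xs) ys r (by simp; omega) ha hb',
            bagInter_cons_right_of_notMem _ _ _ hynot]

-- A-side outer loop: the greedy count is the multiset-intersection count
theorem bpOuterA_spec (A B : List Int) (n : Int) (is : List Int) (r : Int)
    (bA bB : PySem.Set Int) (hjs : (PySem.List.pyRange 0 n).Nodup)
    (hnd : is.Nodup) (hA : ∀ i ∈ is, PySem.Set.contains bA i = false) :
    (bpOuterA A B n is (r, bA, bB)).1 =
      r + (((is.map (fun i => PySem.List.pyGetD A i 0)).bagInter
             (bpRes B (PySem.List.pyRange 0 n) bB)).length : Int) := by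
  induction is generalizing r bA bB with
  | nil => simp [bpOuterA]
  | cons i is' ih =>
    rcases List.nodup_cons.mp hnd with ⟨hinot, hnd'⟩
    have hi : PySem.Set.contains bA i = false := hA i List.mem_cons_self
    have hspec := bpInnerA_spec A B i (PySem.List.pyRange 0 n) r bA bB hjs hi
    by_cases hm : PySem.List.pyGetD A i 0 ∈ bpRes B (PySem.List.pyRange 0 n) bB
    · rcases hspec.2 hm with ⟨j₀, _, heq, hres⟩
      have hA' : ∀ i' ∈ is', PySem.Set.contains (PySem.Set.add bA i) i' = false := by
        intro i' hi'
        rw [contains_eq_decide]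
        simp only [PySem.Set.mem_add, decide_eq_false_iff_not]
        rintro (h | h)
        · have := hA i' (List.mem_cons_of_mem _ hi')
          rw [contains_eq_decide] at this; simp at this; exact this h
        · exact hinot (h ▸ hi')
      rw [show bpOuterA A B n (i :: is') (r, bA, bB)
            = bpOuterA A B n is' (bpInnerA A B i (PySem.List.pyRange 0 n) r bA bB) from rfl,
        heq, ih (r + 1) (PySem.Set.add bA i) (PySem.Set.add bB j₀) hnd' hA', hres,
        List.map_cons, List.cons_bagInter_of_pos _ hm]
      simp; omega
    · rw [show bpOuterA A B n (i :: is') (r, bA, bB)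
            = bpOuterA A B n is' (bpInnerA A B i (PySem.List.pyRange 0 n) r bA bB) from rfl,
        hspec.1 hm, ih r bA bB hnd' (fun i' hi' => hA i' (List.mem_cons_of_mem _ hi')),
        List.map_cons, List.cons_bagInter_of_neg _ hm]

-- index prefix: reading A at 0..m-1 is the prefix A.take m
theorem map_getD_range_eq_take (xs : List Int) (m : Nat) (hm : m ≤ xs.length) :
    (List.range m).map (fun k : Nat => PySem.List.pyGetD xs (k : Int) 0) = xs.take m := by
  simp only [PySem.List.pyGetD_natCast]
  apply List.ext_getElem
  · simp [hm]
  · intro i h1 h2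
    simp at h1 ⊢
    simp [List.getElem?_eq_getElem (show i < xs.length by omega)]

-- ===== VERDICT (by name: the statement is the Claim_ definition above) =====
theorem beautifulPairs_spec : Claim_equal_beautifulPairs := by
  intro A B n _ hpre
  rcases hpre with ⟨hn0, hnA, hnB⟩
  unfold Spec_beautifulPairs beautifulPairs beautifulPairs_alt
  set m := n.toNat with hm_def
  have hn : n = (m : Int) := (Int.toNat_of_nonneg hn0).symm
  have hmA : m ≤ A.length := by omega
  have hmB : m ≤ B.length := by omega
  -- the index list
  have hrange : PySem.List.pyRange 0 n = List.map (fun k : Nat => (k : Int)) (List.range m) := by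
    rw [hn]; exact PySem.List.pyRange_zero_natCast m
  have hjsnd : (PySem.List.pyRange 0 n).Nodup := by
    rw [hrange]
    exact (List.nodup_range).map (fun a b h => by exact_mod_cast h)
  -- side A: the greedy count is |take m A ⋒ take m B|
  have hresempty : bpRes B (PySem.List.pyRange 0 n) PySem.Set.empty = B.take m := by
    unfold bpRes
    rw [List.filter_eq_self.mpr (by intro j _; simp [PySem.Set.empty]),
      hrange, List.map_map]
    exact map_getD_range_eq_take B m hmB
  have hmapA : (PySem.List.pyRange 0 n).map (fun i => PySem.List.pyGetD A i 0) = A.take m := by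
    rw [hrange, List.map_map]
    exact map_getD_range_eq_take A m hmA
  have hAcount : (bpOuterA A B n (PySem.List.pyRange 0 n) (0, PySem.Set.empty, PySem.Set.empty)).1
      = (((A.take m).bagInter (B.take m)).length : Int) := by
    rw [bpOuterA_spec A B n (PySem.List.pyRange 0 n) 0 PySem.Set.empty PySem.Set.empty
        hjsnd hjsnd (fun i _ => by simp [PySem.Set.empty]),
      hmapA, hresempty]
    omega
  -- side B: the merge count is the same
  have hsliceA : PySem.List.slice A none (some n) = A.take m :=
    PySem.List.slice_to A hn0
  have hsliceB : PySem.List.slice B none (some n) = B.take m :=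
    PySem.List.slice_to B hn0
  have hBcount : bpMerge (PySem.List.sorted (PySem.List.slice A none (some n)) (fun x => x))
      (PySem.List.sorted (PySem.List.slice B none (some n)) (fun x => x)) 0
      = (((A.take m).bagInter (B.take m)).length : Int) := by
    unfold bpMerge
    rw [hsliceA, hsliceB,
      bpMergeF_eq_bagInter _ _ _ 0 le_rfl
        (PySem.List.sorted_pairwise _ _) (PySem.List.sorted_pairwise _ _)]
    have hperm := List.Perm.bagInter
      (PySem.List.sorted_perm (A.take m) (fun x => x) false)
      (PySem.List.sorted_perm (B.take m) (fun x => x) false)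
    rw [hperm.length_eq]
    omega
  simp only [hAcount, hBcount]
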